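-- pv_equiv track=rewrite | github.com/UdayKiranPadhy/Leetcode | 2975-maximum-square-area-by-removing-fences-from-a-field/2975-maximum-square-area-by-removing-fences-from-a-field.py | maximizeSquareArea
-- ===== SOURCE A (Python) =====
-- from typing import List
--
-- def maximizeSquareArea(m: int, n: int, hFences: List[int], vFences: List[int]) -> int:
--     hFences = [1] + hFences + [m]
--     vFences = [1] + vFences + [n]
--     hFences.sort()
--     vFences.sort()
--
--     # Calculate Distance Between the Rods
--     hDist = set()
--     N = len(hFences)
--     for i in range(N):
--         for j in range(i+1,N):
--             hDist.add(hFences[j]-hFences[i])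
--
--     vDist = set()
--     N = len(vFences)
--     for i in range(N):
--         for j in range(i+1,N):
--             vDist.add(vFences[j]-vFences[i])
--
--     common = hDist.intersection(vDist)
--     if not common:
--         return -1
--     return max(common)**2 % (10**9 + 7)
-- ===== SOURCE B (Python) =====
-- def maximizeSquareArea(m, n, hFences, vFences):
--     # No hash sets, no set intersection, no max(): collect each side's pairwise
--     # gaps in a list, sort both lists in descending order, and run a two-pointer
--     # merge that returns at the first (= largest) gap the two lists share.
--     MOD = 10**9 + 7
--
--     def gapList(fs, edge):
--         xs = fs + [1, edge]
--         out = []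
--         for i in range(len(xs)):
--             for j in range(i):
--                 out.append(abs(xs[i] - xs[j]))
--         out.sort(reverse=True)
--         return out
--
--     hg = gapList(hFences, m)
--     vg = gapList(vFences, n)
--     i = j = 0
--     while i < len(hg) and j < len(vg):
--         if hg[i] == vg[j]:
--             return hg[i] * hg[i] % MOD
--         if hg[i] > vg[j]:
--             i += 1
--         else:
--             j += 1
--     return -1
-- ===== Notes on version B (the rewrite author's own statement) =====
-- stated objective: alternative
-- what changed: B replaces hash sets, set-intersection and max() entirely: it collects each side's pairwise gaps into a plain list, sorts both lists descending, and finds the largest common gap with a two-pointer merge that stops at the first shared element.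
import Mathlib
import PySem

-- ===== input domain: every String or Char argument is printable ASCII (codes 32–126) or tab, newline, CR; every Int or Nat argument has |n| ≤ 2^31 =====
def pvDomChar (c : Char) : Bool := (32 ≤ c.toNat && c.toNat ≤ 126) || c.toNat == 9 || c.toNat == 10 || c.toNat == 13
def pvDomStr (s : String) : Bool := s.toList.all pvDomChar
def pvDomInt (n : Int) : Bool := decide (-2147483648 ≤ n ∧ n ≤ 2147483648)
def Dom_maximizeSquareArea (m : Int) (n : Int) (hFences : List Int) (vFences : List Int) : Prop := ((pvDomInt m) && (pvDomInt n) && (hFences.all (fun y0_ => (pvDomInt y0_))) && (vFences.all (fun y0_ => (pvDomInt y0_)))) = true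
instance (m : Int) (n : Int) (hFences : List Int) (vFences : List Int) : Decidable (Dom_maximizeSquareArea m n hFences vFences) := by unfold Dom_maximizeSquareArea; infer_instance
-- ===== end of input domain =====

-- B replaces hash sets, set-intersection and max() entirely: it collects each side's
-- pairwise gaps into a plain list, sorts both lists descending, and finds the largest
-- common gap with a two-pointer merge that stops at the first shared element
-- (objective: alternative).

-- ===== PORT A =====
-- A-side helper: the nested 'for i in range(N): for j in range(i+1, N): s.add(ys[j]-ys[i])' loops
def pyPairDiffSet (ys : List Int) : PySem.Set Int :=
  (PySem.List.pyRange 0 (ys.length : Int) 1).foldl (fun s i =>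
    (PySem.List.pyRange (i + 1) (ys.length : Int) 1).foldl (fun s j =>
      PySem.Set.add s (PySem.List.pyGetD ys j 0 - PySem.List.pyGetD ys i 0)) s)
    PySem.Set.empty

def maximizeSquareArea (m : Int) (n : Int) (hFences : List Int) (vFences : List Int) : Int :=
  let hF := PySem.List.sorted (([1] ++ hFences) ++ [m]) (fun x => x) false
  let vF := PySem.List.sorted (([1] ++ vFences) ++ [n]) (fun x => x) false
  let hDist := pyPairDiffSet hF
  let vDist := pyPairDiffSet vF
  let common := PySem.Set.inter hDist vDist
  if common.isEmpty then -1
  else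
    match PySem.List.max? common (fun x => x) with
    | some mx => PySem.Int.mod (mx ^ 2) (10 ^ 9 + 7)
    | none => -1

-- ===== PORT B =====
-- B-side helper: 'for i in range(len(xs)): for j in range(i): out.append(abs(xs[i]-xs[j]))'
def gapPairs (xs : List Int) : List Int :=
  (PySem.List.pyRange 0 (xs.length : Int) 1).foldl (fun out i =>
    (PySem.List.pyRange 0 i 1).foldl (fun out j =>
      out ++ [|PySem.List.pyGetD xs i 0 - PySem.List.pyGetD xs j 0|]) out) []

-- B-side helper: gapList(fs, edge) — collect the gaps, then 'out.sort(reverse=True)'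
def gapList (fs : List Int) (edge : Int) : List Int :=
  PySem.List.sorted (gapPairs (fs ++ [1, edge])) (fun x => x) true

-- B-side helper: the two-pointer merge over the descending gap lists
def twoPointer : List Int → List Int → Int
  | [], _ => -1
  | _ :: _, [] => -1
  | a :: as, b :: bs =>
    if a = b then PySem.Int.mod (a * a) (10 ^ 9 + 7)
    else if a > b then twoPointer as (b :: bs)
    else twoPointer (a :: as) bs
termination_by l1 l2 => l1.length + l2.length

def maximizeSquareArea_alt (m : Int) (n : Int) (hFences : List Int) (vFences : List Int) : Int :=
  let hg := gapList hFences m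
  let vg := gapList vFences n
  twoPointer hg vg

-- ===== PRECONDITION & SPEC =====
def Spec_maximizeSquareArea (m : Int) (n : Int) (hFences : List Int) (vFences : List Int) (out : Int) : Prop := out = maximizeSquareArea_alt m n hFences vFences
instance (m : Int) (n : Int) (hFences : List Int) (vFences : List Int) (out : Int) : Decidable (Spec_maximizeSquareArea m n hFences vFences out) := by unfold Spec_maximizeSquareArea; infer_instance

-- ===== CLAIM (what is proved, stated in full; the proofs are below) =====
def Claim_equal_maximizeSquareArea : Prop := ∀ (m : Int) (n : Int) (hFences : List Int) (vFences : List Int), Dom_maximizeSquareArea m n hFences vFences → Spec_maximizeSquareArea m n hFences vFences (maximizeSquareArea m n hFences vFences)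

-- ===== LEMMAS AND PROOFS =====

-- 'some (unordered) pair of positions of xs is at absolute distance d'
def HasAbsPair (xs : List Int) (d : Int) : Prop := ∃ a b, [a, b].Sublist xs ∧ |a - b| = d

-- membership through the outer loop, once each inner loop is a Set.update
theorem mem_foldl_update {β : Type} (l : List β) (L : β → List Int) (s : PySem.Set Int) (y : Int) :
    y ∈ l.foldl (fun s i => PySem.Set.update s (L i)) s ↔ y ∈ s ∨ ∃ i ∈ l, y ∈ L i := by
  induction l generalizing s with
  | nil => simp
  | cons x t ih => simp [ih, PySem.Set.mem_update]; tauto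

theorem mem_pyPairDiffSet (ys : List Int) (d : Int) :
    d ∈ pyPairDiffSet ys ↔
      ∃ i j : Nat, i < j ∧ j < ys.length ∧ ys.getD j 0 - ys.getD i 0 = d := by
  unfold pyPairDiffSet
  simp only [← PySem.Set.update_map_eq_foldl_add]
  rw [mem_foldl_update]
  simp only [PySem.Set.empty, List.not_mem_nil, false_or, List.mem_map,
    PySem.List.mem_pyRange_one]
  constructor
  · rintro ⟨i, ⟨hi0, hiN⟩, j, ⟨hj1, hjN⟩, rfl⟩
    refine ⟨i.toNat, j.toNat, by omega, by omega, ?_⟩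
    rw [PySem.List.pyGetD_of_nonneg _ _ hi0, PySem.List.pyGetD_of_nonneg _ _ (by omega)]
  · rintro ⟨i, j, hij, hjN, hd⟩
    refine ⟨(i : Int), ⟨by omega, by omega⟩, (j : Int), ⟨by omega, by omega⟩, ?_⟩
    rw [PySem.List.pyGetD_of_nonneg _ _ (by positivity), PySem.List.pyGetD_of_nonneg _ _ (by positivity)]
    simpa using hd

theorem pair_sublist_iff (l : List Int) (a b : Int) :
    [a, b].Sublist l ↔ ∃ i j : Nat, i < j ∧ j < l.length ∧ l.getD i 0 = a ∧ l.getD j 0 = b := by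
  constructor
  · intro h
    induction l with
    | nil => simp at h
    | cons x t ih =>
      cases h with
      | cons _ h' =>
        obtain ⟨i, j, hij, hj, ha, hb⟩ := ih h'
        exact ⟨i+1, j+1, by omega, by simp; omega, by simpa using ha, by simpa using hb⟩
      | cons₂ _ h' =>
        have hbm : b ∈ t := List.singleton_sublist.mp h'
        obtain ⟨k, hk, hbk⟩ := List.mem_iff_getElem.mp hbm
        exact ⟨0, k+1, by omega, by simp; omega, rfl,
          by simp [List.getElem?_eq_getElem hk, hbk]⟩
  · rintro ⟨i, j, hij, hj, ha, hb⟩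
    have hi : i < l.length := lt_trans hij hj
    have h1 : [a].Sublist (l.take j) := by
      rw [List.singleton_sublist]
      have : (l.take j)[i]'(by simp; omega) = l[i] := List.getElem_take
      rw [← ha, List.getD_eq_getElem l 0 hi, ← this]
      exact List.getElem_mem _
    have h2 : [b].Sublist (l.drop j) := by
      rw [List.drop_eq_getElem_cons hj]
      rw [List.getD_eq_getElem l 0 hj] at hb
      exact hb ▸ (List.singleton_sublist.mpr (List.mem_cons_self))
    have := List.Sublist.append h1 h2
    simpa [List.take_append_drop] using this

theorem perm_pair {a b : Int} {t : List Int} (h : t.Perm [a, b]) : t = [a, b] ∨ t = [b, a] := by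
  have hlen : t.length = 2 := by simpa using h.length_eq
  obtain ⟨c, d, rfl⟩ := List.length_eq_two.mp hlen
  by_cases hca : c = a
  · subst hca
    left
    have := List.Perm.cons_inv h
    simp [List.perm_singleton] at this
    simp [this]
  · have hcb : c = b := by
      have : c ∈ [a, b] := h.mem_iff.mp (by simp)
      simp at this; tauto
    subst hcb
    right
    have h2 : ([c, d]).Perm [c, a] := h.trans (List.Perm.swap _ _ _)
    have := List.Perm.cons_inv h2
    simp [List.perm_singleton] at this
    simp [this]

theorem hasAbsPair_of_perm {xs ys : List Int} (h : xs.Perm ys) {d : Int} :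
    HasAbsPair xs d → HasAbsPair ys d := by
  rintro ⟨a, b, hs, hd⟩
  have hsub : [a, b].Subperm ys := (hs.subperm).trans h.subperm
  obtain ⟨t, ht, hts⟩ := hsub
  rcases perm_pair ht with rfl | rfl
  · exact ⟨a, b, hts, hd⟩
  · exact ⟨b, a, hts, by rwa [abs_sub_comm]⟩

theorem absIdx_iff (xs : List Int) (d : Int) :
    (∃ i j : Nat, j < i ∧ i < xs.length ∧ |xs.getD i 0 - xs.getD j 0| = d) ↔ HasAbsPair xs d := by
  constructor
  · rintro ⟨i, j, hji, hiN, hd⟩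
    exact ⟨xs.getD j 0, xs.getD i 0,
      (pair_sublist_iff xs _ _).mpr ⟨j, i, hji, hiN, rfl, rfl⟩,
      by rwa [abs_sub_comm]⟩
  · rintro ⟨a, b, hs, hd⟩
    obtain ⟨i, j, hij, hj, ha, hb⟩ := (pair_sublist_iff xs a b).mp hs
    exact ⟨j, i, hij, hj, by rw [ha, hb, abs_sub_comm]; exact hd⟩

theorem mem_pyPairDiffSet_sorted (xs : List Int) (d : Int) :
    d ∈ pyPairDiffSet (PySem.List.sorted xs (fun x => x) false) ↔ HasAbsPair xs d := by
  rw [mem_pyPairDiffSet]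
  have hperm := PySem.List.sorted_perm xs (fun x => x) false
  have hpw := PySem.List.sorted_pairwise xs (fun x => x)
  rw [List.pairwise_iff_getElem] at hpw
  constructor
  · rintro ⟨i, j, hij, hj, hd⟩
    have hi : i < (PySem.List.sorted xs (fun x => x) false).length := lt_trans hij hj
    have hle := hpw i j hi hj hij
    refine hasAbsPair_of_perm hperm ⟨_, _,
      (pair_sublist_iff _ _ _).mpr ⟨i, j, hij, hj, rfl, rfl⟩, ?_⟩
    rw [List.getD_eq_getElem _ 0 hi, List.getD_eq_getElem _ 0 hj] at hd ⊢
    rw [abs_of_nonpos (by omega)]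
    omega
  · intro h
    obtain ⟨a, b, hs, hd⟩ := hasAbsPair_of_perm hperm.symm h
    obtain ⟨i, j, hij, hj, ha, hb⟩ := (pair_sublist_iff _ a b).mp hs
    have hi : i < (PySem.List.sorted xs (fun x => x) false).length := lt_trans hij hj
    have hle := hpw i j hi hj hij
    refine ⟨i, j, hij, hj, ?_⟩
    rw [List.getD_eq_getElem _ 0 hi] at ha
    rw [List.getD_eq_getElem _ 0 hj] at hb
    rw [List.getD_eq_getElem _ 0 hi, List.getD_eq_getElem _ 0 hj, ha, hb]
    rw [ha, hb] at hle
    rw [abs_of_nonpos (by omega)] at hd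
    omega

-- gapPairs xs holds exactly the absolute pairwise gaps of xs
theorem mem_gapPairs (xs : List Int) (d : Int) :
    d ∈ gapPairs xs ↔ HasAbsPair xs d := by
  unfold gapPairs
  rw [← absIdx_iff]
  have hinner : ∀ (i : Int) (out : List Int),
      (PySem.List.pyRange 0 i 1).foldl (fun out j =>
        out ++ [|PySem.List.pyGetD xs i 0 - PySem.List.pyGetD xs j 0|]) out
      = out ++ (PySem.List.pyRange 0 i 1).map
          (fun j => |PySem.List.pyGetD xs i 0 - PySem.List.pyGetD xs j 0|) := by
    intro i out
    exact PySem.List.foldl_append_singleton_eq_map _ _ _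
  simp only [hinner]
  rw [PySem.List.foldl_append_eq_flatMap]
  simp only [List.nil_append, List.mem_flatMap, List.mem_map, PySem.List.mem_pyRange_one]
  constructor
  · rintro ⟨i, ⟨hi0, hiN⟩, j, ⟨hj0, hji⟩, rfl⟩
    refine ⟨i.toNat, j.toNat, by omega, by omega, ?_⟩
    rw [PySem.List.pyGetD_of_nonneg _ _ hi0, PySem.List.pyGetD_of_nonneg _ _ hj0]
  · rintro ⟨i, j, hji, hiN, hd⟩
    refine ⟨(i : Int), ⟨by omega, by omega⟩, (j : Int), ⟨by omega, by omega⟩, ?_⟩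
    rw [PySem.List.pyGetD_of_nonneg _ _ (by positivity), PySem.List.pyGetD_of_nonneg _ _ (by positivity)]
    simpa using hd

theorem mem_gapList (fs : List Int) (edge : Int) (d : Int) :
    d ∈ gapList fs edge ↔ HasAbsPair (fs ++ [1, edge]) d := by
  unfold gapList
  rw [PySem.List.mem_sorted, mem_gapPairs]

theorem gapList_pairwise (fs : List Int) (edge : Int) :
    (gapList fs edge).Pairwise (fun a b => b ≤ a) := by
  unfold gapList
  exact PySem.List.sorted_pairwise_rev _ _

-- the two-pointer merge on descending lists: either no common element and -1,
-- or it returns (max common)² mod 1e9+7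
theorem twoPointer_spec (l1 l2 : List Int)
    (h1 : l1.Pairwise (fun a b => b ≤ a)) (h2 : l2.Pairwise (fun a b => b ≤ a)) :
    (twoPointer l1 l2 = -1 ∧ ∀ d, d ∈ l1 → d ∈ l2 → False) ∨
    ∃ mx, mx ∈ l1 ∧ mx ∈ l2 ∧ (∀ d, d ∈ l1 → d ∈ l2 → d ≤ mx) ∧
      twoPointer l1 l2 = PySem.Int.mod (mx * mx) (10 ^ 9 + 7) := by
  revert h1 h2
  induction l1, l2 using twoPointer.induct with
  | case1 l2 =>
    intro h1 h2; left; exact ⟨by rw [twoPointer], by simp⟩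
  | case2 a as =>
    intro h1 h2; left; exact ⟨by rw [twoPointer], by simp⟩
  | case3 as b bs =>
    intro h1 h2
    right
    refine ⟨b, by simp, by simp, ?_, by rw [twoPointer, if_pos rfl]⟩
    intro d hd1 _
    rcases List.mem_cons.mp hd1 with rfl | hd1'
    · exact le_refl d
    · exact (List.pairwise_cons.mp h1).1 d hd1'
  | case4 a as b bs hne hgt ih =>
    intro h1 h2
    have h1' := (List.pairwise_cons.mp h1).2
    have ha : ∀ y ∈ as, y ≤ a := (List.pairwise_cons.mp h1).1
    have hb : ∀ y ∈ b :: bs, y ≤ b := by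
      intro y hy
      rcases List.mem_cons.mp hy with rfl | hy'
      · exact le_refl y
      · exact (List.pairwise_cons.mp h2).1 y hy'
    have hstep : twoPointer (a :: as) (b :: bs) = twoPointer as (b :: bs) := by
      rw [twoPointer, if_neg hne, if_pos hgt]
    have hnota : ∀ d, d ∈ a :: as → d ∈ b :: bs → d ∈ as := by
      intro d hd1 hd2
      rcases List.mem_cons.mp hd1 with rfl | hd1'
      · exact absurd (hb d hd2) (by omega)
      · exact hd1'
    rcases ih h1' h2 with ⟨hv, hno⟩ | ⟨mx, hm1, hm2, hmax, hv⟩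
    · left
      exact ⟨by rw [hstep, hv], fun d hd1 hd2 => hno d (hnota d hd1 hd2) hd2⟩
    · right
      exact ⟨mx, List.mem_cons_of_mem a hm1, hm2,
        fun d hd1 hd2 => hmax d (hnota d hd1 hd2) hd2, by rw [hstep, hv]⟩
  | case5 a as b bs hne hngt ih =>
    intro h1 h2
    have h2' := (List.pairwise_cons.mp h2).2
    have ha : ∀ y ∈ a :: as, y ≤ a := by
      intro y hy
      rcases List.mem_cons.mp hy with rfl | hy'
      · exact le_refl y
      · exact (List.pairwise_cons.mp h1).1 y hy'
    have hstep : twoPointer (a :: as) (b :: bs) = twoPointer (a :: as) bs := by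
      rw [twoPointer, if_neg hne, if_neg hngt]
    have hnotb : ∀ d, d ∈ a :: as → d ∈ b :: bs → d ∈ bs := by
      intro d hd1 hd2
      rcases List.mem_cons.mp hd2 with rfl | hd2'
      · have : d ≤ a := ha d hd1
        have : ¬ a > d := hngt
        exact absurd (ha d hd1) (by omega)
      · exact hd2'
    rcases ih h1 h2' with ⟨hv, hno⟩ | ⟨mx, hm1, hm2, hmax, hv⟩
    · left
      exact ⟨by rw [hstep, hv], fun d hd1 hd2 => hno d hd1 (hnotb d hd1 hd2)⟩
    · right
      exact ⟨mx, hm1, List.mem_cons_of_mem b hm2,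
        fun d hd1 hd2 => hmax d hd1 (hnotb d hd1 hd2), by rw [hstep, hv]⟩

theorem maximizeSquareArea_core (m : Int) (n : Int) (hFences : List Int) (vFences : List Int) :
    maximizeSquareArea m n hFences vFences = maximizeSquareArea_alt m n hFences vFences := by
  simp only [maximizeSquareArea, maximizeSquareArea_alt]
  have hpermH : (([1] ++ hFences) ++ [m]).Perm (hFences ++ [1, m]) := by
    have h1 : (hFences ++ [1, m]).Perm (1 :: (hFences ++ [m])) := by
      simpa using (List.perm_middle (a := (1:Int)) (l₁ := hFences) (l₂ := [m]))
    simp only [List.singleton_append] at h1 ⊢; exact h1.symm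
  have hpermV : (([1] ++ vFences) ++ [n]).Perm (vFences ++ [1, n]) := by
    have h1 : (vFences ++ [1, n]).Perm (1 :: (vFences ++ [n])) := by
      simpa using (List.perm_middle (a := (1:Int)) (l₁ := vFences) (l₂ := [n]))
    simp only [List.singleton_append] at h1 ⊢; exact h1.symm
  set C := PySem.Set.inter
      (pyPairDiffSet (PySem.List.sorted (([1] ++ hFences) ++ [m]) (fun x => x) false))
      (pyPairDiffSet (PySem.List.sorted (([1] ++ vFences) ++ [n]) (fun x => x) false)) with hC
  have HmemC : ∀ d : Int, d ∈ C ↔ d ∈ gapList hFences m ∧ d ∈ gapList vFences n := by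
    intro d
    rw [hC, PySem.Set.mem_inter, mem_pyPairDiffSet_sorted, mem_pyPairDiffSet_sorted,
      mem_gapList, mem_gapList]
    constructor
    · rintro ⟨hh, hv⟩
      exact ⟨hasAbsPair_of_perm hpermH hh, hasAbsPair_of_perm hpermV hv⟩
    · rintro ⟨hh, hv⟩
      exact ⟨hasAbsPair_of_perm hpermH.symm hh, hasAbsPair_of_perm hpermV.symm hv⟩
  rcases twoPointer_spec (gapList hFences m) (gapList vFences n)
      (gapList_pairwise _ _) (gapList_pairwise _ _) with ⟨hv, hno⟩ | ⟨mx, hm1, hm2, hmax, hv⟩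
  · have hCnil : C = [] := by
      rw [List.eq_nil_iff_forall_not_mem]
      intro d hd
      obtain ⟨h1, h2⟩ := (HmemC d).mp hd
      exact hno d h1 h2
    rw [if_pos (List.isEmpty_iff.mpr hCnil), hv]
  · have hCne : C ≠ [] := by
      intro hnil
      have : mx ∈ C := (HmemC mx).mpr ⟨hm1, hm2⟩
      simp [hnil] at this
    rw [if_neg (by simpa [List.isEmpty_iff] using hCne)]
    cases hmx : PySem.List.max? C (fun x => x) with
    | none => exact absurd ((PySem.List.max?_eq_none_iff C _).mp hmx) hCne
    | some mxA =>
      have hmxAC : mxA ∈ C := PySem.List.max?_mem hmx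
      obtain ⟨hA1, hA2⟩ := (HmemC mxA).mp hmxAC
      have hle1 : mxA ≤ mx := hmax mxA hA1 hA2
      have hle2 : mx ≤ mxA := PySem.List.max?_isMax hmx mx ((HmemC mx).mpr ⟨hm1, hm2⟩)
      have : mxA = mx := le_antisymm hle1 hle2
      rw [this, hv]
      show PySem.Int.mod (mx ^ 2) (10 ^ 9 + 7) = PySem.Int.mod (mx * mx) (10 ^ 9 + 7)
      rw [pow_two]

-- ===== VERDICT (by name: the statement is the Claim_ definition above) =====
theorem maximizeSquareArea_spec : Claim_equal_maximizeSquareArea := by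
  intro m n hFences vFences _
  unfold Spec_maximizeSquareArea
  exact maximizeSquareArea_core m n hFences vFences
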